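-- pv_equiv track=rewrite | github.com/DNYoussef/Spek-template | src/monitoring/cicd_integration_hooks.py | _evaluate_stage_status
-- ===== SOURCE A (Python) =====
-- from typing import Dict, List, Optional, Callable, Any, Union
--
-- def _evaluate_stage_status(stage_results: Dict[str, Any]) -> str:
--     """Evaluate the overall status of a pipeline stage."""
--     if not stage_results:
--         return "success"
--
--     statuses = []
--     for hook_name, result in stage_results.items():
--         status = result.get("status", "unknown")
--         statuses.append(status)
--
--     # If any hook failed, the stage failed
--     if "failed" in statuses:
--         return "failed"
--     elif "warning" in statuses:
--         return "warning"
--     elif all(s == "success" for s in statuses):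
--         return "success"
--     else:
--         return "partial"
-- ===== SOURCE B (Python) =====
-- def _evaluate_stage_status(stage_results):
--     """Evaluate the overall status of a pipeline stage (severity-rank fold)."""
--     if not stage_results:
--         return "success"
--     rank = {"failed": 3, "warning": 2, "success": 0}
--     worst = 0
--     for result in stage_results.values():
--         worst = max(worst, rank.get(result.get("status", "unknown"), 1))
--     return {3: "failed", 2: "warning", 1: "partial", 0: "success"}[worst]
-- ===== Notes on version B (the rewrite author's own statement) =====
-- stated objective: alternative
-- what changed: Replaces the build-a-status-list-then-three-membership/all-scans structure with a single fold that accumulates the maximum severity rank (failed=3, warning=2, unknown=1, success=0) and maps the final rank back to a status word.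
import Mathlib
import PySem

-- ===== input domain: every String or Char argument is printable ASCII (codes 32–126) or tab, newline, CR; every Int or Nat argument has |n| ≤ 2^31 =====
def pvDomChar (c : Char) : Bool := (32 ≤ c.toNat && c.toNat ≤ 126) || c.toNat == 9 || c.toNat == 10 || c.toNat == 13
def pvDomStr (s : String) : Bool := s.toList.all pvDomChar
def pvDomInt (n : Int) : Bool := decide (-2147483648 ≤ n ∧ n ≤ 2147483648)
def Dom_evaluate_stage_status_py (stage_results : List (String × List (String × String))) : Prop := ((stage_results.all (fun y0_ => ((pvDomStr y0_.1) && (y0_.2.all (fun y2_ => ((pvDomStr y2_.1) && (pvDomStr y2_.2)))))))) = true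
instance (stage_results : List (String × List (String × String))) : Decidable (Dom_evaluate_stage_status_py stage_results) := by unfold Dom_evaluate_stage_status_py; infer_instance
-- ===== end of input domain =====

-- B replaces A's status-list plus three membership/all scans by a single fold that keeps
-- the maximum severity rank and maps it back to a status word (objective: alternative).

-- ===== PORT A =====
def evaluate_stage_status_py (stage_results : List (String × List (String × String))) : String :=
  if stage_results = [] then "success"
  else
    -- statuses = []; for hook_name, result in items: statuses.append(result.get("status","unknown"))
    let statuses := stage_results.foldl
      (fun acc p => acc ++ [(PySem.Dict.mk p.2).getD "status" "unknown"]) []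
    if statuses.contains "failed" then "failed"
    else if statuses.contains "warning" then "warning"
    else if statuses.all (fun s => s == "success") then "success"
    else "partial"

-- ===== PORT B =====
def pvRankTable : PySem.Dict String Int :=
  PySem.Dict.mk [("failed", 3), ("warning", 2), ("success", 0)]
def pvBackTable : PySem.Dict Int String :=
  PySem.Dict.mk [(3, "failed"), (2, "warning"), (1, "partial"), (0, "success")]

def evaluate_stage_status_py_alt (stage_results : List (String × List (String × String))) : String :=
  if stage_results = [] then "success"
  else
    let worst := stage_results.foldl
      (fun w p => max w (pvRankTable.getD ((PySem.Dict.mk p.2).getD "status" "unknown") 1)) 0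
    pvBackTable.getD worst "success"

-- ===== PRECONDITION & SPEC =====
def Spec_evaluate_stage_status_py (stage_results : List (String × List (String × String))) (out : String) : Prop := out = evaluate_stage_status_py_alt stage_results
instance (stage_results : List (String × List (String × String))) (out : String) : Decidable (Spec_evaluate_stage_status_py stage_results out) := by unfold Spec_evaluate_stage_status_py; infer_instance

-- ===== CLAIM (what is proved, stated in full; the proofs are below) =====
def Claim_equal_evaluate_stage_status_py : Prop := ∀ (stage_results : List (String × List (String × String))), Dom_evaluate_stage_status_py stage_results → Spec_evaluate_stage_status_py stage_results (evaluate_stage_status_py stage_results)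

-- ===== LEMMAS AND PROOFS =====

def pvStatus (p : String × List (String × String)) : String :=
  (PySem.Dict.mk p.2).getD "status" "unknown"

def pvRank (s : String) : Int := pvRankTable.getD s 1

lemma pv_rank_def (s : String) : pvRank s =
    if s = "failed" then 3 else if s = "warning" then 2 else if s = "success" then 0 else 1 := by
  simp only [pvRank, pvRankTable, PySem.Dict.getD_eq_get?_getD, PySem.Dict.get?_mk_cons, beq_iff_eq]
  by_cases h1 : s = "failed"
  · subst_vars; simp_all
  by_cases h2 : s = "warning"
  · subst_vars; simp_all
  by_cases h3 : s = "success"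
  · subst_vars; simp_all
  rw [if_neg (fun h => h1 h.symm), if_neg (fun h => h2 h.symm), if_neg (fun h => h3 h.symm),
      if_neg h1, if_neg h2, if_neg h3]
  rfl

lemma pv_foldl_append (ls : List (String × List (String × String))) (acc : List String) :
    ls.foldl (fun acc p => acc ++ [(PySem.Dict.mk p.2).getD "status" "unknown"]) acc
      = acc ++ ls.map pvStatus := by
  induction ls generalizing acc with
  | nil => simp
  | cons h t ih => simp [List.foldl_cons, ih, pvStatus]

lemma pv_foldl_max (ls : List (String × List (String × String))) (w : Int) (hw : 0 ≤ w) :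
    ls.foldl (fun w p => max w (pvRankTable.getD ((PySem.Dict.mk p.2).getD "status" "unknown") 1)) w
      = (ls.map pvStatus).foldr (fun s a => max (pvRank s) a) w := by
  induction ls generalizing w with
  | nil => simp
  | cons h t ih =>
    simp only [List.foldl_cons, List.map_cons, List.foldr_cons]
    rw [ih _ (le_trans hw (le_max_left _ _))]
    show (t.map pvStatus).foldr _ (max w (pvRank (pvStatus h)))
       = max (pvRank (pvStatus h)) ((t.map pvStatus).foldr _ w)
    generalize t.map pvStatus = ss
    induction ss with
    | nil => simp [max_comm]
    | cons s ss ihs => simp only [List.foldr_cons] at *; omega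

lemma pv_worst_char (ss : List String) :
    (0 ≤ ss.foldr (fun s a => max (pvRank s) a) (0 : Int) ∧
       ss.foldr (fun s a => max (pvRank s) a) (0 : Int) ≤ 3) ∧
    (ss.foldr (fun s a => max (pvRank s) a) (0 : Int) = 3 ↔ "failed" ∈ ss) ∧
    (2 ≤ ss.foldr (fun s a => max (pvRank s) a) (0 : Int) ↔ ("failed" ∈ ss ∨ "warning" ∈ ss)) ∧
    (ss.foldr (fun s a => max (pvRank s) a) (0 : Int) = 0 ↔ ∀ s ∈ ss, s = "success") := by
  induction ss with
  | nil => simp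
  | cons s t ih =>
    obtain ⟨⟨hl, hu⟩, h3, h2, h0⟩ := ih
    simp only [List.foldr_cons, List.mem_cons]
    rw [pv_rank_def]
    by_cases c1 : s = "failed"
    · rw [if_pos c1]
      exact ⟨⟨by omega, by omega⟩,
        iff_of_true (by omega) (Or.inl c1.symm),
        iff_of_true (by omega) (Or.inl (Or.inl c1.symm)),
        iff_of_false (by omega) (fun h => by have := h s (Or.inl rfl); rw [c1] at this; simp at this)⟩
    rw [if_neg c1]
    by_cases c2 : s = "warning"
    · rw [if_pos c2]
      refine ⟨⟨by omega, by omega⟩, ?_, ?_, ?_⟩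
      · by_cases m3 : "failed" ∈ t
        · exact iff_of_true (by have := h3.mpr m3; omega) (Or.inr m3)
        · refine iff_of_false (by
            have hne : t.foldr (fun s a => max (pvRank s) a) (0 : Int) ≠ 3 := fun h => m3 (h3.mp h)
            omega) ?_
          rintro (h | h)
          · exact c1 h.symm
          · exact m3 h
      · exact iff_of_true (by omega) (Or.inr (Or.inl c2.symm))
      · exact iff_of_false (by omega) (fun h => by rw [c2] at h; simp at h)
    rw [if_neg c2]
    by_cases c3 : s = "success"
    · rw [if_pos c3, max_eq_right hl]
      refine ⟨⟨hl, hu⟩, ?_, ?_, ?_⟩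
      · exact ⟨fun h => Or.inr (h3.mp h),
          fun h => h3.mpr (h.resolve_left (fun h' => c1 h'.symm))⟩
      · constructor
        · intro h; exact (h2.mp h).imp Or.inr Or.inr
        · rintro ((h | h) | (h | h))
          · exact absurd h.symm c1
          · exact h2.mpr (Or.inl h)
          · exact absurd h.symm c2
          · exact h2.mpr (Or.inr h)
      · exact ⟨fun h x hx => by rcases hx with rfl | hx; exacts [c3, h0.mp h x hx],
          fun h => h0.mpr (fun x hx => h x (Or.inr hx))⟩
    · rw [if_neg c3]
      refine ⟨⟨by omega, by omega⟩, ?_, ?_, ?_⟩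
      · by_cases m3 : "failed" ∈ t
        · exact iff_of_true (by have := h3.mpr m3; omega) (Or.inr m3)
        · refine iff_of_false (by
            have hne : t.foldr (fun s a => max (pvRank s) a) (0 : Int) ≠ 3 := fun h => m3 (h3.mp h)
            omega) ?_
          rintro (h | h)
          · exact c1 h.symm
          · exact m3 h
      · have hred : (2 ≤ max (1 : Int) (t.foldr (fun s a => max (pvRank s) a) 0)) ↔
            2 ≤ t.foldr (fun s a => max (pvRank s) a) (0 : Int) := by omega
        rw [hred, h2]
        constructor
        · intro h; exact h.imp Or.inr Or.inr
        · rintro ((h | h) | (h | h))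
          · exact absurd h.symm c1
          · exact Or.inl h
          · exact absurd h.symm c2
          · exact Or.inr h
      · exact iff_of_false (by omega) (fun h => c3 (h s (Or.inl rfl)))

-- ===== VERDICT (by name: the statement is the Claim_ definition above) =====
theorem evaluate_stage_status_py_spec : Claim_equal_evaluate_stage_status_py := by
  intro sr _
  show evaluate_stage_status_py sr = evaluate_stage_status_py_alt sr
  unfold evaluate_stage_status_py evaluate_stage_status_py_alt
  by_cases hemp : sr = []
  · simp [hemp]
  · simp only [hemp, if_false]
    rw [pv_foldl_append, pv_foldl_max _ _ le_rfl]
    simp only [List.nil_append]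
    obtain ⟨⟨hl, hu⟩, h3, h2, h0⟩ := pv_worst_char (sr.map pvStatus)
    set w := (sr.map pvStatus).foldr (fun s a => max (pvRank s) a) (0 : Int) with hwdef
    by_cases hf : "failed" ∈ sr.map pvStatus
    · have hw3 : w = 3 := h3.mpr hf
      rw [if_pos (by simpa using hf), hw3]
      rfl
    · rw [if_neg (by simpa using hf)]
      by_cases hwar : "warning" ∈ sr.map pvStatus
      · have hw2 : w = 2 := by
          have := h2.mpr (Or.inr hwar)
          have : w ≠ 3 := fun h => hf (h3.mp h)
          omega
        rw [if_pos (by simpa using hwar), hw2]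
        rfl
      · rw [if_neg (by simpa using hwar)]
        by_cases hall : ∀ s ∈ sr.map pvStatus, s = "success"
        · have hw0 : w = 0 := h0.mpr hall
          have hb : ((sr.map pvStatus).all (fun s => s == "success")) = true := by
            rw [List.all_eq_true]; intro x hx; exact beq_iff_eq.mpr (hall x hx)
          rw [if_pos hb, hw0]
          rfl
        · have hw1 : w = 1 := by
            have hne3 : w ≠ 3 := fun h => hf (h3.mp h)
            have hlt2 : ¬ 2 ≤ w := fun h => by
              rcases h2.mp h with h | h
              · exact hf h
              · exact hwar h
            have hne0 : w ≠ 0 := fun h => hall (h0.mp h)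
            omega
          have hb : ¬ ((sr.map pvStatus).all (fun s => s == "success")) = true := by
            rw [List.all_eq_true]
            intro h
            exact hall (fun x hx => beq_iff_eq.mp (h x hx))
          rw [if_neg hb, hw1]
          rfl
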